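-- pv_equiv track=rewrite | github.com/EOH0/Git-python | 241128/test/2string.py | remove_adjacent_pairs
-- ===== SOURCE A (Python) =====
-- def remove_adjacent_pairs(s):
--     # 리스트로 변환하여 처리
--     a = []  # 결과를 저장할 스택
--     b = list(s)  # 입력 문자열을 리스트로 변환
--
--     while True:
--         if len(a) == 0 and len(b) != 0:
--             a.append(b.pop(0))
--         elif len(a) != 0 and len(b) != 0:
--             if a[-1] == b[0]:
--                 a.pop(-1)  # 같은 문자 제거
--                 b.pop(0)   # 제거된 문자와 함께 다음 문자 제거
--             else:
--                 a.append(b.pop(0))  # 다른 문자 추가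
--         else:
--             break
--
--     # 최종 결과 반환
--     return 1 if len(a) == 0 else 0
-- ===== SOURCE B (Python) =====
-- def remove_adjacent_pairs(s):
--     # Single pass with an end-of-list stack (append/pop), O(n) instead of A's pop(0) shifting.
--     stack = []
--     for ch in s:
--         if stack and stack[-1] == ch:
--             stack.pop()
--         else:
--             stack.append(ch)
--     return 1 if not stack else 0
-- ===== Notes on version B (the rewrite author's own statement) =====
-- stated objective: faster
-- what changed: Replaced A's while-loop over two lists with repeated b.pop(0) (O(n) shift each step) by a single for-pass pushing/popping at the end of one stack.
import Mathlib
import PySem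

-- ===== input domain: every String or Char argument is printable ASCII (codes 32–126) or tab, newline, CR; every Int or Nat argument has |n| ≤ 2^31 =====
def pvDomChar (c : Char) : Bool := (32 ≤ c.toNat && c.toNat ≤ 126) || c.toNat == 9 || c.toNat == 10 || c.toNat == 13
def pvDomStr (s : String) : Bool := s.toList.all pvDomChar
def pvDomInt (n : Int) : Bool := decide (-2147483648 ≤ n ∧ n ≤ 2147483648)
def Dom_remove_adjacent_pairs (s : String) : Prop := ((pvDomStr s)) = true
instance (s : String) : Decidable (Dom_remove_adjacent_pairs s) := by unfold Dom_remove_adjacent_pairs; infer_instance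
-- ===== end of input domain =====

-- B replaces A's two-list while-loop with repeated pop(0) by a single pass pushing/popping
-- at the end of one stack (objective: faster, asymptotic).


-- ===== PORT A =====
-- A's while-loop: state (a, b); each iteration moves b's head onto a's end, or cancels it
-- against a's last element; it breaks when b is empty and returns 1 iff a is empty.
def pvLoopA : List Char → List Char → Int
  | a, [] => if a.length = 0 then 1 else 0
  | a, c :: bs =>
    if a.length = 0 then pvLoopA (a ++ [c]) bs
    else if a.getLast! == c then pvLoopA a.dropLast bs
    else pvLoopA (a ++ [c]) bs

def remove_adjacent_pairs (s : String) : Int := pvLoopA [] s.toList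

-- ===== PORT B =====
-- B's stack step: for each character, pop a matching top else push (stack front = top).
def pvStepB (st : List Char) (c : Char) : List Char :=
  match st with
  | x :: xs => if x == c then xs else c :: x :: xs
  | [] => [c]

def remove_adjacent_pairs_alt (s : String) : Int :=
  if s.toList.foldl pvStepB [] = [] then 1 else 0

-- ===== PRECONDITION & SPEC =====
def Spec_remove_adjacent_pairs (s : String) (out : Int) : Prop := out = remove_adjacent_pairs_alt s
instance (s : String) (out : Int) : Decidable (Spec_remove_adjacent_pairs s out) := by unfold Spec_remove_adjacent_pairs; infer_instance

-- ===== CLAIM (what is proved, stated in full; the proofs are below) =====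
def Claim_equal_remove_adjacent_pairs : Prop := ∀ (s : String), Dom_remove_adjacent_pairs s → Spec_remove_adjacent_pairs s (remove_adjacent_pairs s)

-- ===== LEMMAS AND PROOFS =====

-- A's stack `a` (top at the end) is B's stack reversed (top at the front).
theorem pvLoopA_eq_fold (b a : List Char) :
    pvLoopA a b = (if b.foldl pvStepB a.reverse = [] then 1 else 0) := by
  induction b generalizing a with
  | nil =>
      simp [pvLoopA, List.length_eq_zero_iff]
  | cons c bs ih =>
      rcases a with _ | ⟨x, xs⟩
      · simp [pvLoopA, pvStepB, ih]
      · have hne : (x :: xs) ≠ ([] : List Char) := by simp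
        have hrev : (x :: xs).reverse = (x :: xs).getLast hne :: (x :: xs).dropLast.reverse := by
          conv_lhs => rw [← List.dropLast_append_getLast hne]
          simp
        have hdg : (x :: xs).getLast? = some ((x :: xs).getLast hne) :=
          List.getLast?_eq_some_getLast hne
        simp only [pvLoopA, List.length_cons]
        by_cases h : (x :: xs).getLast hne = c
        · have hstep : pvStepB (x :: xs).reverse c = (x :: xs).dropLast.reverse := by
            rw [hrev]; simp [pvStepB, h]
          rw [if_neg (by simp), if_pos (by simp [hdg, h]), ih]
          rw [List.foldl_cons, hstep]
        · have hstep : pvStepB (x :: xs).reverse c = c :: (x :: xs).reverse := by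
            conv_lhs => rw [hrev]
            simp [pvStepB, h, hrev]
          rw [if_neg (by simp), if_neg (by simp [hdg, h]), ih]
          rw [List.foldl_cons, hstep]
          simp

-- ===== VERDICT (by name: the statement is the Claim_ definition above) =====
theorem remove_adjacent_pairs_spec : Claim_equal_remove_adjacent_pairs := by
  intro s _
  unfold Spec_remove_adjacent_pairs remove_adjacent_pairs remove_adjacent_pairs_alt
  rw [pvLoopA_eq_fold]
  simp
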